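-- pv_equiv track=rewrite | github.com/uvsq22104773/TER_jeu-isolation | Algorithmes.py | plusGrandNombreDeFilsPuisGrandSousArbre
-- ===== SOURCE A (Python) =====
-- def calcul(tree, sommet):
--     if sommet not in tree:
--         return 1
--     return 1 + sum(calcul(tree, fils) for fils in tree[sommet])
--
-- def plusGrandNombreDeFilsPuisGrandSousArbre(tree, ls=None, res=None):
--     if ls is None:
--         ls = [1]
--     if res is None:
--         res = []
--     maxGlobal = 0
--     areteGlobale = None
--     aTraiter = []
--
--     for s in ls:
--         maxFils = 0
--         maxSommet = 0
--         arete = None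
--
--         if s not in tree:
--             continue
--
--         for fs in tree[s]:
--             aTraiter.append(fs)
--             nbFils = len(tree[fs]) if fs in tree else 0
--             nbSommet = calcul(tree, fs)
--
--             if nbFils > maxFils:
--                 maxFils = nbFils
--                 maxSommet = nbSommet
--                 arete = (s, fs)
--             elif nbFils == maxFils and nbSommet > maxSommet:
--                 maxFils = nbFils
--                 maxSommet = nbSommet
--                 arete = (s, fs)
--
--         if maxSommet > maxGlobal:
--             maxGlobal = maxSommet
--             areteGlobale = arete
--
--     if areteGlobale:
--         res.append(areteGlobale)
--         if areteGlobale[1] in aTraiter: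
--             aTraiter.remove(areteGlobale[1])
--
--     if not aTraiter:
--         return res, maxGlobal
--     else:
--         sub_res, sub_max = plusGrandNombreDeFilsPuisGrandSousArbre(tree, aTraiter, res)
--         return sub_res, maxGlobal + sub_max
-- ===== SOURCE B (Python) =====
-- def _size(tree, v):
--     total = 0
--     for w in tree.get(v, ()):
--         total += _size(tree, w)
--     return 1 + total
--
-- def plusGrandNombreDeFilsPuisGrandSousArbre(tree, ls=None, res=None):
--     if ls is None:
--         ls = [1]
--     if res is None:
--         res = []
--     total = 0
--     frontier = ls
--     while True:
--         bests = []
--         for s in frontier: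
--             kids = tree.get(s)
--             if not kids:
--                 continue
--             m = max(kids, key=lambda f: (len(tree.get(f, ())), _size(tree, f)))
--             bests.append((_size(tree, m), (s, m)))
--         if bests:
--             mg, ag = max(bests, key=lambda b: b[0])
--         else:
--             mg, ag = 0, None
--         total += mg
--         nxt = [f for s in frontier for f in tree.get(s, ())]
--         if ag is not None:
--             res.append(ag)
--             try:
--                 nxt.remove(ag[1])
--             except ValueError:
--                 pass
--         if not nxt:
--             return res, total
--         frontier = nxt
-- ===== Notes on version B (the rewrite author's own statement) =====
-- stated objective: alternative
-- what changed: A's hand-rolled running-best loops (tracking maxFils/maxSommet/arete per node and per level) and its per-level tail recursion are replaced by building per-level candidate lists selected with max(key=(fanout, subtree size)) / max(key=size) and an iterative frontier while-loop; the subtree size is an accumulator fold instead of a generator-sum.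
import Mathlib
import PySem

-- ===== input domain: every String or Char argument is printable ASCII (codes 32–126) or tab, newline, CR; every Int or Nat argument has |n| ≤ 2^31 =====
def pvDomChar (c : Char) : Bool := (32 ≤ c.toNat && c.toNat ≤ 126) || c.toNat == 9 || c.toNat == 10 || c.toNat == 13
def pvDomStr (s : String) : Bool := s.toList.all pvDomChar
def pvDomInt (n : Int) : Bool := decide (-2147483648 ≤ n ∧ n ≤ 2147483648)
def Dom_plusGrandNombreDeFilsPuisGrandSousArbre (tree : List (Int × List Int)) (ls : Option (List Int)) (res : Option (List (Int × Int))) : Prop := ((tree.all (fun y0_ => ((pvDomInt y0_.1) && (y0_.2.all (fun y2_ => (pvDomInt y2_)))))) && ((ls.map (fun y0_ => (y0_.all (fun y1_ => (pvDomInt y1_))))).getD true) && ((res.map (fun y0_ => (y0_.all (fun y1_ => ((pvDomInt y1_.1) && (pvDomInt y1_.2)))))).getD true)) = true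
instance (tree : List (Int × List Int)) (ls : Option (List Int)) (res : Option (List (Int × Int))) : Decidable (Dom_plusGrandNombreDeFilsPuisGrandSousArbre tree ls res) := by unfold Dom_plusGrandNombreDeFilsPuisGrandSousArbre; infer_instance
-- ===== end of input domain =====

-- B restructures A's hand-rolled best-candidate loops into per-level max(key=…) selections over
-- candidate lists and replaces the per-level tail recursion by an iterative frontier loop
-- (objective: alternative; same asymptotic cost).  Both Pythons mutate `res` (append) identically
-- when it is passed in; the theorems are about the return value.
-- Both ports run the per-level recursion and the subtree-size recursion on fuel tree.length + 1;
-- on Pre_ (acyclic child relation) this matches the Pythons, and the ports are equal for EVERY fuel.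

-- ===== PORT A =====
def pyCalcul (d : PySem.Dict Int (List Int)) : Nat → Int → Int
  | 0, _ => 1
  | f + 1, s =>
    match d.get? s with
    | none => 1
    | some cs => 1 + (cs.map (fun fils => pyCalcul d f fils)).sum

def innerStepA (d : PySem.Dict Int (List Int)) (cf : Nat) (s : Int)
    (ist : (Int × Int × Option (Int × Int)) × List Int) (fs : Int) :
    (Int × Int × Option (Int × Int)) × List Int :=
  let aT := ist.2 ++ [fs]
  let nbFils : Int := if d.contains fs then PySem.List.len (d.getD fs []) else 0
  let nbSommet := pyCalcul d cf fs
  if nbFils > ist.1.1 then ((nbFils, nbSommet, some (s, fs)), aT)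
  else if nbFils == ist.1.1 && nbSommet > ist.1.2.1 then ((nbFils, nbSommet, some (s, fs)), aT)
  else (ist.1, aT)

def outerStepA (d : PySem.Dict Int (List Int)) (cf : Nat)
    (st : (Int × Option (Int × Int)) × List Int) (s : Int) :
    (Int × Option (Int × Int)) × List Int :=
  if d.contains s then
    let ist := (d.getD s []).foldl (innerStepA d cf s) ((0, 0, none), st.2)
    if ist.1.2.1 > st.1.1 then ((ist.1.2.1, ist.1.2.2), ist.2) else (st.1, ist.2)
  else st

def levelA (d : PySem.Dict Int (List Int)) (cf : Nat) (ls : List Int) :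
    (Int × Option (Int × Int)) × List Int :=
  ls.foldl (outerStepA d cf) ((0, none), [])

def afterA (st : (Int × Option (Int × Int)) × List Int) (res : List (Int × Int)) :
    List (Int × Int) × List Int :=
  match st.1.2 with
  | none => (res, st.2)
  | some e => (res ++ [e], if e.2 ∈ st.2 then (PySem.List.remove? st.2 e.2).getD st.2 else st.2)

def goA (d : PySem.Dict Int (List Int)) (cf : Nat) :
    Nat → List Int → List (Int × Int) → List (Int × Int) × Int
  | 0, ls, res =>          -- fuel guard only; under Pre_ the Python recursion ends before this
    let st := levelA d cf ls
    let ra := afterA st res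
    (ra.1, st.1.1)
  | f + 1, ls, res =>
    let st := levelA d cf ls
    let ra := afterA st res
    if ra.2 = [] then (ra.1, st.1.1)
    else
      let sub := goA d cf f ra.2 ra.1
      (sub.1, st.1.1 + sub.2)

def plusGrandNombreDeFilsPuisGrandSousArbre (tree : List (Int × List Int)) (ls : Option (List Int)) (res : Option (List (Int × Int))) : (List (Int × Int)) × Int :=
  let d := PySem.Dict.ofList tree
  goA d (tree.length + 1) (tree.length + 1) (ls.getD [1]) (res.getD [])

-- ===== PORT B =====
def altSize (d : PySem.Dict Int (List Int)) : Nat → Int → Int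
  | 0, _ => 1
  | f + 1, v => 1 + (d.getD v []).foldl (fun t w => t + altSize d f w) 0

def bestStepB (d : PySem.Dict Int (List Int)) (cf : Nat)
    (bs : List (Int × (Int × Int))) (s : Int) : List (Int × (Int × Int)) :=
  match d.get? s with
  | none => bs
  | some kids =>
    match PySem.List.max2? kids (fun f => PySem.List.len (d.getD f [])) (fun f => altSize d cf f) with
    | none => bs
    | some m => bs ++ [(altSize d cf m, (s, m))]

def levelB (d : PySem.Dict Int (List Int)) (cf : Nat) (frontier : List Int) :
    (Int × Option (Int × Int)) × List Int :=
  let bests := frontier.foldl (bestStepB d cf) []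
  let flat := frontier.flatMap (fun s => d.getD s [])
  match PySem.List.max? bests (fun b => b.1) with
  | none => ((0, none), flat)
  | some b => ((b.1, some b.2), flat)

def afterB (st : (Int × Option (Int × Int)) × List Int) (res : List (Int × Int)) :
    List (Int × Int) × List Int :=
  match st.1.2 with
  | none => (res, st.2)
  | some e =>
    (res ++ [e],
     match PySem.List.remove? st.2 e.2 with   -- try: remove / except ValueError: pass
     | none => st.2
     | some l => l)

def goB (d : PySem.Dict Int (List Int)) (cf : Nat) :
    Nat → List Int → List (Int × Int) → Int → List (Int × Int) × Int
  | 0, frontier, res, total =>   -- fuel guard only, matching goA's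
    let st := levelB d cf frontier
    let ra := afterB st res
    (ra.1, total + st.1.1)
  | f + 1, frontier, res, total =>
    let st := levelB d cf frontier
    let ra := afterB st res
    if ra.2 = [] then (ra.1, total + st.1.1)
    else goB d cf f ra.2 ra.1 (total + st.1.1)

def plusGrandNombreDeFilsPuisGrandSousArbre_alt (tree : List (Int × List Int)) (ls : Option (List Int)) (res : Option (List (Int × Int))) : (List (Int × Int)) × Int :=
  let d := PySem.Dict.ofList tree
  goB d (tree.length + 1) (tree.length + 1) (ls.getD [1]) (res.getD []) 0

-- ===== PRECONDITION & SPEC =====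
def acySucc (tree : List (Int × List Int)) (s : Int) : List Int :=
  (PySem.Dict.ofList tree).getD s []
def acyStep (tree : List (Int × List Int)) (S : List Int) : List Int :=
  PySem.Set.ofList (S ++ S.flatMap (acySucc tree))
def acyReach (tree : List (Int × List Int)) : Nat → List Int → List Int
  | 0, S => S
  | n + 1, S => acyReach tree n (acyStep tree S)

-- Pre_ excludes exactly the inputs on which Python A does not return normally: a key on a
-- directed cycle of the child relation that is reachable from the start list makes A's calcul
-- recurse forever (RecursionError).  The ports are fuelled and equal on every input; Pre_ is
-- needed only so that the claim speaks about inputs where the Python A has a value at all.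
def Pre_plusGrandNombreDeFilsPuisGrandSousArbre (tree : List (Int × List Int)) (ls : Option (List Int)) (res : Option (List (Int × Int))) : Prop :=
  ∀ k ∈ tree.map (fun p => p.1),
    k ∈ acyReach tree (tree.length + 1) (ls.getD [1]) →
    k ∉ acyReach tree tree.length (acySucc tree k)
instance (tree : List (Int × List Int)) (ls : Option (List Int)) (res : Option (List (Int × Int))) : Decidable (Pre_plusGrandNombreDeFilsPuisGrandSousArbre tree ls res) := by
  unfold Pre_plusGrandNombreDeFilsPuisGrandSousArbre; infer_instance

def pvWitness_plusGrandNombreDeFilsPuisGrandSousArbre : (List (Int × List Int)) × Option (List Int) × (Option (List (Int × Int))) :=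
  ([(1, [2, 3]), (2, [4])], none, none)

def Spec_plusGrandNombreDeFilsPuisGrandSousArbre (tree : List (Int × List Int)) (ls : Option (List Int)) (res : Option (List (Int × Int))) (out : (List (Int × Int)) × Int) : Prop := out = plusGrandNombreDeFilsPuisGrandSousArbre_alt tree ls res
instance (tree : List (Int × List Int)) (ls : Option (List Int)) (res : Option (List (Int × Int))) (out : (List (Int × Int)) × Int) : Decidable (Spec_plusGrandNombreDeFilsPuisGrandSousArbre tree ls res out) := by unfold Spec_plusGrandNombreDeFilsPuisGrandSousArbre; infer_instance

-- ===== CLAIM (what is proved, stated in full; the proofs are below) =====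
def Claim_equal_plusGrandNombreDeFilsPuisGrandSousArbre : Prop := ∀ (tree : List (Int × List Int)) (ls : Option (List Int)) (res : Option (List (Int × Int))), Dom_plusGrandNombreDeFilsPuisGrandSousArbre tree ls res → Pre_plusGrandNombreDeFilsPuisGrandSousArbre tree ls res → Spec_plusGrandNombreDeFilsPuisGrandSousArbre tree ls res (plusGrandNombreDeFilsPuisGrandSousArbre tree ls res)

-- ===== LEMMAS AND PROOFS =====

theorem calcul_eq_altSize (d : PySem.Dict Int (List Int)) : ∀ (f : Nat) (v : Int),
    pyCalcul d f v = altSize d f v := by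
  intro f
  induction f with
  | zero => intro v; rfl
  | succ f ih =>
    intro v
    simp only [pyCalcul, altSize]
    cases h : d.get? v with
    | none =>
      simp [PySem.Dict.getD, h]
    | some cs =>
      simp [PySem.Dict.getD, h, PySem.List.foldl_add]
      congr 1
      exact List.map_congr_left (fun w _ => ih w)

theorem one_le_altSize (d : PySem.Dict Int (List Int)) : ∀ (f : Nat) (v : Int),
    1 ≤ altSize d f v := by
  intro f
  induction f with
  | zero => intro v; simp [altSize]
  | succ f ih =>
    intro v
    simp only [altSize, PySem.List.foldl_add, zero_add]
    have : 0 ≤ ((d.getD v []).map (altSize d f)).sum := by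
      apply List.sum_nonneg
      intro x hx
      obtain ⟨w, _, rfl⟩ := List.mem_map.mp hx
      exact le_trans (by norm_num) (ih w)
    omega

-- proof-side helpers: the running maxima PySem.List.max2? / max? compute
def max2from (d : PySem.Dict Int (List Int)) (cf : Nat) (m : Int) (kids : List Int) : Int :=
  kids.foldl (fun m x =>
    if (decide (PySem.List.len (d.getD m []) < PySem.List.len (d.getD x []))
        || (!decide (PySem.List.len (d.getD x []) < PySem.List.len (d.getD m []))
            && decide (altSize d cf m < altSize d cf x))) = true then x else m) m

def max1from (b : Int × (Int × Int)) (bl : List (Int × (Int × Int))) : Int × (Int × Int) :=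
  bl.foldl (fun b x => if b.1 < x.1 then x else b) b

theorem max2?_cons (d : PySem.Dict Int (List Int)) (cf : Nat) : ∀ (rest : List Int) (c : Int),
    PySem.List.max2? (c :: rest) (fun f => PySem.List.len (d.getD f [])) (fun f => altSize d cf f)
      = some (max2from d cf c rest) := by
  intro rest
  induction rest with
  | nil => intro c; rfl
  | cons x rest ih =>
    intro c
    by_cases h : (decide (PySem.List.len (d.getD c []) < PySem.List.len (d.getD x []))
        || (!decide (PySem.List.len (d.getD x []) < PySem.List.len (d.getD c []))
            && decide (altSize d cf c < altSize d cf x))) = true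
    · have := ih x
      simp only [PySem.List.max2?, List.foldl_cons, max2from] at this ⊢
      simp only [h, if_pos]
      simpa using this
    · have := ih c
      simp only [PySem.List.max2?, List.foldl_cons, max2from] at this ⊢
      simp only [h]
      simpa [h] using this

theorem max?_cons : ∀ (bl : List (Int × (Int × Int))) (b : Int × (Int × Int)),
    PySem.List.max? (b :: bl) (fun p => p.1) = some (max1from b bl) := by
  intro bl
  induction bl with
  | nil => intro b; rfl
  | cons x bl ih =>
    intro b
    by_cases h : b.1 < x.1
    · have := ih x
      simp only [PySem.List.max?, List.foldl_cons, max1from] at this ⊢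
      simp only [h, if_pos]
      simpa using this
    · have := ih b
      simp only [PySem.List.max?, List.foldl_cons, max1from] at this ⊢
      simp only [h]
      simpa [h] using this

theorem lenIf_eq (d : PySem.Dict Int (List Int)) (x : Int) :
    (if d.contains x then PySem.List.len (d.getD x []) else 0) = PySem.List.len (d.getD x []) := by
  by_cases h : d.contains x
  · simp [h]
  · rw [if_neg (by simp [h]), PySem.Dict.getD_of_not_contains d [] (by simpa using h)]
    simp [PySem.List.len_eq]

-- the selection both loops perform on one candidate (same Bool test as PySem.List.max2?'s step)
def pick (d : PySem.Dict Int (List Int)) (cf : Nat) (m x : Int) : Int :=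
  if (decide (PySem.List.len (d.getD m []) < PySem.List.len (d.getD x []))
      || (!decide (PySem.List.len (d.getD x []) < PySem.List.len (d.getD m []))
          && decide (altSize d cf m < altSize d cf x))) = true then x else m

theorem max2from_cons (d : PySem.Dict Int (List Int)) (cf : Nat) (m x : Int) (rest : List Int) :
    max2from d cf m (x :: rest) = max2from d cf (pick d cf m x) rest := by
  simp only [max2from, List.foldl_cons, pick]

theorem innerStepA_eq (d : PySem.Dict Int (List Int)) (cf : Nat) (s : Int) (m x : Int)
    (aT : List Int) :
    innerStepA d cf s ((PySem.List.len (d.getD m []), altSize d cf m, some (s, m)), aT) x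
      = ((PySem.List.len (d.getD (pick d cf m x) []), altSize d cf (pick d cf m x),
          some (s, pick d cf m x)), aT ++ [x]) := by
  simp only [innerStepA, lenIf_eq, calcul_eq_altSize, pick, gt_iff_lt]
  by_cases h1 : PySem.List.len (d.getD m []) < PySem.List.len (d.getD x [])
  · rw [if_pos h1, if_pos (by rw [decide_eq_true h1]; simp)]
  · rw [if_neg h1]
    by_cases h2 : PySem.List.len (d.getD x []) < PySem.List.len (d.getD m [])
    · have hne : (PySem.List.len (d.getD x []) == PySem.List.len (d.getD m [])) = false := by
        simp only [beq_eq_false_iff_ne, ne_eq]; omega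
      rw [if_neg (by rw [hne]; simp), if_neg (by rw [decide_eq_true h2, decide_eq_false h1]; simp)]
    · have he : PySem.List.len (d.getD x []) = PySem.List.len (d.getD m []) := by omega
      by_cases h3 : altSize d cf m < altSize d cf x
      · rw [if_pos (by rw [he]; simp [h3]), if_pos (by rw [decide_eq_true h3, decide_eq_false h2]; simp)]
      · rw [if_neg (by simp [h3]), if_neg (by rw [decide_eq_false h1, decide_eq_false h2, decide_eq_false h3]; simp)]

theorem innerA_from (d : PySem.Dict Int (List Int)) (cf : Nat) (s : Int) :
    ∀ (rest : List Int) (m : Int) (aT : List Int),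
    rest.foldl (innerStepA d cf s)
        ((PySem.List.len (d.getD m []), altSize d cf m, some (s, m)), aT)
      = ((PySem.List.len (d.getD (max2from d cf m rest) []),
          altSize d cf (max2from d cf m rest), some (s, max2from d cf m rest)), aT ++ rest) := by
  intro rest
  induction rest with
  | nil => intro m aT; simp [max2from]
  | cons x rest ih =>
    intro m aT
    rw [List.foldl_cons, innerStepA_eq, max2from_cons d cf m x rest, ih]
    simp

theorem innerA_top (d : PySem.Dict Int (List Int)) (cf : Nat) (s : Int)
    (kids : List Int) (aT : List Int) :
    kids.foldl (innerStepA d cf s) (((0 : Int), (0 : Int), (none : Option (Int × Int))), aT)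
      = ((match PySem.List.max2? kids (fun f => PySem.List.len (d.getD f []))
            (fun f => altSize d cf f) with
          | none => ((0 : Int), (0 : Int), (none : Option (Int × Int)))
          | some m => (PySem.List.len (d.getD m []), altSize d cf m, some (s, m))),
         aT ++ kids) := by
  cases kids with
  | nil => simp [PySem.List.max2?]
  | cons c rest =>
    rw [List.foldl_cons]
    have hstep : innerStepA d cf s (((0 : Int), (0 : Int), (none : Option (Int × Int))), aT) c
        = ((PySem.List.len (d.getD c []), altSize d cf c, some (s, c)), aT ++ [c]) := by
      simp only [innerStepA, lenIf_eq, calcul_eq_altSize, gt_iff_lt]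
      by_cases h1 : (0 : Int) < PySem.List.len (d.getD c [])
      · rw [if_pos h1]
      · have h0 : PySem.List.len (d.getD c []) = 0 := by
          have := PySem.List.len_eq (d.getD c []); omega
        have hs := one_le_altSize d cf c
        rw [if_neg h1, if_pos (by rw [h0]; simp; omega)]
    rw [hstep, innerA_from, max2?_cons]
    simp

-- outer selection
def pickb (b x : Int × (Int × Int)) : Int × (Int × Int) := if b.1 < x.1 then x else b

theorem max1from_cons (b x : Int × (Int × Int)) (bl : List (Int × (Int × Int))) :
    max1from b (x :: bl) = max1from (pickb b x) bl := rfl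

def pstep (q : Int × Option (Int × Int)) (b : Int × (Int × Int)) : Int × Option (Int × Int) :=
  if b.1 > q.1 then (b.1, some b.2) else q

theorem pstep_eq (b x : Int × (Int × Int)) :
    pstep (b.1, some b.2) x = ((pickb b x).1, some (pickb b x).2) := by
  simp only [pstep, pickb, gt_iff_lt]
  by_cases h : b.1 < x.1
  · rw [if_pos h, if_pos h]
  · rw [if_neg h, if_neg h]

theorem pfold_from : ∀ (bl : List (Int × (Int × Int))) (b : Int × (Int × Int)),
    bl.foldl pstep (b.1, some b.2) = ((max1from b bl).1, some (max1from b bl).2) := by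
  intro bl
  induction bl with
  | nil => intro b; rfl
  | cons x bl ih =>
    intro b
    rw [List.foldl_cons, pstep_eq, max1from_cons, ih]

theorem pfold_top (bl : List (Int × (Int × Int))) (h : ∀ b ∈ bl, 1 ≤ b.1) :
    bl.foldl pstep ((0 : Int), (none : Option (Int × Int)))
      = match PySem.List.max? bl (fun p => p.1) with
        | none => ((0 : Int), (none : Option (Int × Int)))
        | some b => (b.1, some b.2) := by
  cases bl with
  | nil => rfl
  | cons b bl =>
    rw [List.foldl_cons]
    have hb : pstep ((0 : Int), (none : Option (Int × Int))) b = (b.1, some b.2) := by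
      have : (1 : Int) ≤ b.1 := h b (by simp)
      simp only [pstep, gt_iff_lt]
      rw [if_pos (by omega)]
    rw [hb, pfold_from, max?_cons]

def bOf (d : PySem.Dict Int (List Int)) (cf : Nat) (s : Int) : Option (Int × (Int × Int)) :=
  (d.get? s).bind (fun kids =>
    (PySem.List.max2? kids (fun f => PySem.List.len (d.getD f [])) (fun f => altSize d cf f)).map
      (fun m => (altSize d cf m, (s, m))))

theorem bestsB_eq (d : PySem.Dict Int (List Int)) (cf : Nat) :
    ∀ (ls : List Int) (acc : List (Int × (Int × Int))),
    ls.foldl (bestStepB d cf) acc = acc ++ ls.filterMap (bOf d cf) := by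
  intro ls
  induction ls with
  | nil => intro acc; simp
  | cons s ls ih =>
    intro acc
    rw [List.foldl_cons, List.filterMap_cons]
    have : bestStepB d cf acc s
        = match bOf d cf s with
          | none => acc
          | some b => acc ++ [b] := by
      cases hg : d.get? s with
      | none => simp [bestStepB, bOf, hg]
      | some kids =>
        cases hm : PySem.List.max2? kids (fun f => PySem.List.len (d.getD f []))
            (fun f => altSize d cf f) with
        | none => simp only [bestStepB, bOf, hg, Option.bind_some]; rw [hm]; rfl
        | some m => simp only [bestStepB, bOf, hg, Option.bind_some]; rw [hm]; rfl
    rw [this]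
    cases h : bOf d cf s with
    | none => simp [ih]
    | some b => simp [ih]

theorem bests_pos (d : PySem.Dict Int (List Int)) (cf : Nat) (ls : List Int) :
    ∀ b ∈ ls.filterMap (bOf d cf), 1 ≤ b.1 := by
  intro b hb
  obtain ⟨s, _, hs⟩ := List.mem_filterMap.mp hb
  simp only [bOf, Option.bind_eq_some_iff] at hs
  obtain ⟨kids, _, hm⟩ := hs
  obtain ⟨m, _, rfl⟩ := Option.map_eq_some_iff.mp hm
  exact one_le_altSize d cf m

theorem outer_general (d : PySem.Dict Int (List Int)) (cf : Nat) :
    ∀ (ls : List Int) (p : Int × Option (Int × Int)) (aT : List Int), 0 ≤ p.1 →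
    ls.foldl (outerStepA d cf) (p, aT)
      = ((ls.filterMap (bOf d cf)).foldl pstep p,
         aT ++ ls.flatMap (fun s => d.getD s [])) := by
  intro ls
  induction ls with
  | nil => intro p aT _; simp
  | cons s ls ih =>
    intro p aT hp
    rw [List.foldl_cons, List.filterMap_cons]
    cases hg : d.get? s with
    | none =>
      have hc : d.contains s = false := by
        rw [PySem.Dict.contains_eq_isSome_get?, hg]; rfl
      have hstep : outerStepA d cf (p, aT) s = (p, aT) := by
        simp [outerStepA, hc]
      have hd : d.getD s [] = [] := PySem.Dict.getD_of_not_contains d [] hc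
      rw [hstep, ih p aT hp]
      simp [bOf, hg, hd]
    | some kids =>
      have hc : d.contains s = true := by
        rw [PySem.Dict.contains_eq_isSome_get?, hg]; rfl
      have hd : d.getD s [] = kids := by
        simp [PySem.Dict.getD, hg]
      cases hm : PySem.List.max2? kids (fun f => PySem.List.len (d.getD f []))
          (fun f => altSize d cf f) with
      | none =>
        have hkids : kids = [] := by
          cases kids with
          | nil => rfl
          | cons c r => rw [max2?_cons] at hm; exact absurd hm (by simp)
        have hstep : outerStepA d cf (p, aT) s = (p, aT) := by
          unfold outerStepA
          rw [if_pos hc]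
          show (if (List.foldl (innerStepA d cf s) ((0, 0, none), aT) (d.getD s [])).1.2.1 > p.1
              then _ else _) = _
          rw [hd, hkids]
          simp only [List.foldl_nil, gt_iff_lt]
          rw [if_neg (by omega)]
        have hbof : bOf d cf s = none := by
          simp only [bOf, hg, Option.bind_some]; rw [hm]; rfl
        rw [hstep, ih p aT hp, hbof, List.flatMap_cons, hd, hkids]
        simp
      | some m =>
        have hstep : outerStepA d cf (p, aT) s
            = (pstep p (altSize d cf m, (s, m)), aT ++ kids) := by
          unfold outerStepA
          rw [if_pos hc]
          show (if (List.foldl (innerStepA d cf s) ((0, 0, none), aT) (d.getD s [])).1.2.1 > p.1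
              then _ else _) = _
          rw [hd, innerA_top, hm]
          simp only [pstep, gt_iff_lt]
          by_cases h : p.1 < altSize d cf m
          · rw [if_pos h, if_pos h]
          · rw [if_neg h, if_neg h]
        have hp' : 0 ≤ (pstep p (altSize d cf m, (s, m))).1 := by
          simp only [pstep, gt_iff_lt]
          split
          · have := one_le_altSize d cf m; omega
          · exact hp
        have hbof : bOf d cf s = some (altSize d cf m, (s, m)) := by
          simp only [bOf, hg, Option.bind_some]; rw [hm]; rfl
        rw [hstep, ih _ _ hp', hbof, List.flatMap_cons, hd]
        simp [List.foldl_cons, List.append_assoc]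

theorem level_eq (d : PySem.Dict Int (List Int)) (cf : Nat) (ls : List Int) :
    levelA d cf ls = levelB d cf ls := by
  rw [levelA, levelB, outer_general d cf ls ((0 : Int), none) [] (by simp),
    pfold_top _ (bests_pos d cf ls), bestsB_eq]
  simp only [List.nil_append]
  cases PySem.List.max? (ls.filterMap (bOf d cf)) (fun p => p.1) with
  | none => rfl
  | some b => rfl

theorem after_eq (st : (Int × Option (Int × Int)) × List Int) (res : List (Int × Int)) :
    afterA st res = afterB st res := by
  cases h : st.1.2 with
  | none => simp [afterA, afterB, h]
  | some e =>
    simp only [afterA, afterB, h]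
    cases hr : PySem.List.remove? st.2 e.2 with
    | none =>
      rw [if_neg (by rw [← PySem.List.remove?_eq_none_iff (xs := st.2) (v := e.2)]; exact hr)]
    | some l =>
      have hmem : e.2 ∈ st.2 := by
        by_contra hn
        rw [(PySem.List.remove?_eq_none_iff (xs := st.2) (v := e.2)).mpr hn] at hr
        exact absurd hr (by simp)
      rw [if_pos hmem]
      rfl

theorem go_eq (d : PySem.Dict Int (List Int)) (cf : Nat) : ∀ (fuel : Nat) (fr : List Int)
    (res : List (Int × Int)) (total : Int),
    goB d cf fuel fr res total = ((goA d cf fuel fr res).1, total + (goA d cf fuel fr res).2) := by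
  intro fuel
  induction fuel with
  | zero =>
    intro fr res total
    simp only [goA, goB, level_eq, after_eq]
  | succ f ih =>
    intro fr res total
    simp only [goA, goB, level_eq, after_eq]
    by_cases h : (afterB (levelB d cf fr) res).2 = []
    · rw [if_pos h, if_pos h]
    · rw [if_neg h, if_neg h, ih]
      simp [add_assoc]

theorem final_eq (tree : List (Int × List Int)) (ls : Option (List Int)) (res : Option (List (Int × Int))) :
    plusGrandNombreDeFilsPuisGrandSousArbre tree ls res
      = plusGrandNombreDeFilsPuisGrandSousArbre_alt tree ls res := by
  unfold plusGrandNombreDeFilsPuisGrandSousArbre plusGrandNombreDeFilsPuisGrandSousArbre_alt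
  rw [go_eq]
  simp

-- ===== VERDICT (by name: the statement is the Claim_ definition above) =====
theorem plusGrandNombreDeFilsPuisGrandSousArbre_spec : Claim_equal_plusGrandNombreDeFilsPuisGrandSousArbre := by
  intro tree ls res _ _
  unfold Spec_plusGrandNombreDeFilsPuisGrandSousArbre
  exact final_eq tree ls res
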